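-- pv_equiv track=rewrite | github.com/shm0214/ChineseNER | model/LatticeLSTM/LatticeLSTM.py | convert_forward_gaz_to_backward
-- ===== SOURCE A (Python) =====
-- def init_list_of_objects(size):
--     list_of_objects = list()
--     for _ in range(size):
--         list_of_objects.append(list())
--     return list_of_objects
--
-- def convert_forward_gaz_to_backward(forward_gaz):
--     length = len(forward_gaz)
--     backward_gaz = init_list_of_objects(length)
--     for idx in range(length):
--         if forward_gaz[idx]:
--             assert(len(forward_gaz[idx]) == 2)
--             num = len(forward_gaz[idx][0])
--             for i in range(num):
--                 word_id = forward_gaz[idx][0][i]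
--                 word_length = forward_gaz[idx][1][i]
--                 new_pos = idx + word_length - 1
--                 if backward_gaz[new_pos]:
--                     backward_gaz[new_pos][0].append(word_id)
--                     backward_gaz[new_pos][1].append(word_length)
--                 else:
--                     backward_gaz[new_pos] = [[word_id], [word_length]]
--     return backward_gaz
-- ===== SOURCE B (Python) =====
-- def convert_forward_gaz_to_backward(forward_gaz):
--     length = len(forward_gaz)
--     # gather phase: flatten the gazetteer into (end_pos, word_id, word_length) placements
--     placements = []
--     for idx, entry in enumerate(forward_gaz):
--         if entry:
--             assert (len(entry) == 2)
--             for i in range(len(entry[0])):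
--                 placements.append((idx + entry[1][i] - 1, entry[0][i], entry[1][i]))
--     # scatter phase: one flat pass dropping each placement into its cell
--     backward_gaz = [[] for _ in range(length)]
--     for pos, word_id, word_length in placements:
--         if not backward_gaz[pos]:
--             backward_gaz[pos] = [[], []]
--         backward_gaz[pos][0].append(word_id)
--         backward_gaz[pos][1].append(word_length)
--     return backward_gaz
-- ===== Notes on version B (the rewrite author's own statement) =====
-- stated objective: alternative
-- what changed: B replaces A's nested in-place loop (which interleaves reading the gazetteer and updating backward cells) by two flat passes: a gather phase that flattens the gazetteer into a list of (end_position, word_id, word_length) placements, then a single scatter pass that drops each placement into its cell of a comprehension-initialised output list.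
import Mathlib
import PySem

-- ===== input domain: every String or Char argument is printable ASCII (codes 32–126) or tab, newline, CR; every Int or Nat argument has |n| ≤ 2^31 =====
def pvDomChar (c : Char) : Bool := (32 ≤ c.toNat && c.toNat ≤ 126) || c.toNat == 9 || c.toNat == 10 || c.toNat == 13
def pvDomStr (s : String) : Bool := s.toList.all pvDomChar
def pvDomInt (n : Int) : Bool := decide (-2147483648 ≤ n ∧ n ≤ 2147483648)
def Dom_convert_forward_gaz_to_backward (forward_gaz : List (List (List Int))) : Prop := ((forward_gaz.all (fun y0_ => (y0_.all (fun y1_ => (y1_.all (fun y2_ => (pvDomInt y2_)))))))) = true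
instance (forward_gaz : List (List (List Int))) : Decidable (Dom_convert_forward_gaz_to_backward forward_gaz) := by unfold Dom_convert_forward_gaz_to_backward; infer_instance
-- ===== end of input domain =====

-- B re-implements A's nested in-place loop as a flatten-into-placements phase plus one flat scatter
-- pass (a different decomposition, not faster); A mutates nothing observable to the caller.

-- ===== PORT A =====
def init_list_of_objects (size : Int) : List (List (List Int)) :=
  (PySem.List.pyRange 0 size 1).foldl (fun acc _ => acc ++ [([] : List (List Int))]) []

def convert_forward_gaz_to_backward (forward_gaz : List (List (List Int))) : List (List (List Int)) :=
  let length : Int := forward_gaz.length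
  (PySem.List.pyRange 0 length 1).foldl (fun backward_gaz idx =>
    let entry := PySem.List.pyGetD forward_gaz idx []
    if entry ≠ [] then
      -- assert(len(entry) == 2) raises outside Pre_; pyGetD/pySetD are exact under Pre_ (all indices in range)
      let num : Int := (PySem.List.pyGetD entry 0 []).length
      (PySem.List.pyRange 0 num 1).foldl (fun backward_gaz i =>
        let word_id := PySem.List.pyGetD (PySem.List.pyGetD entry 0 []) i 0
        let word_length := PySem.List.pyGetD (PySem.List.pyGetD entry 1 []) i 0
        let new_pos := idx + word_length - 1
        let cur := PySem.List.pyGetD backward_gaz new_pos []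
        if cur ≠ [] then
          PySem.List.pySetD backward_gaz new_pos
            [PySem.List.pyGetD cur 0 [] ++ [word_id], PySem.List.pyGetD cur 1 [] ++ [word_length]]
        else
          PySem.List.pySetD backward_gaz new_pos [[word_id], [word_length]]) backward_gaz
    else backward_gaz) (init_list_of_objects length)

-- ===== PORT B =====
def convert_forward_gaz_to_backward_alt (forward_gaz : List (List (List Int))) : List (List (List Int)) :=
  let placements : List (Int × Int × Int) :=
    (PySem.List.enumerate forward_gaz 0).foldl (fun placements p =>
      if p.2 ≠ [] then
        (PySem.List.pyRange 0 ((PySem.List.pyGetD p.2 0 []).length : Int) 1).foldl (fun placements i =>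
          placements ++ [(p.1 + PySem.List.pyGetD (PySem.List.pyGetD p.2 1 []) i 0 - 1,
            PySem.List.pyGetD (PySem.List.pyGetD p.2 0 []) i 0,
            PySem.List.pyGetD (PySem.List.pyGetD p.2 1 []) i 0)]) placements
      else placements) []
  let backward_gaz0 : List (List (List Int)) :=
    (PySem.List.pyRange 0 (forward_gaz.length : Int) 1).foldl (fun acc _ => acc ++ [[]]) []
  placements.foldl (fun backward_gaz t =>
    let cell := PySem.List.pyGetD backward_gaz t.1 []
    let backward_gaz1 := if cell = [] then PySem.List.pySetD backward_gaz t.1 [[], []] else backward_gaz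
    let cur := PySem.List.pyGetD backward_gaz1 t.1 []
    PySem.List.pySetD backward_gaz1 t.1
      [PySem.List.pyGetD cur 0 [] ++ [t.2.1], PySem.List.pyGetD cur 1 [] ++ [t.2.2]]) backward_gaz0

-- ===== PRECONDITION & SPEC =====
-- Pre_ excludes exactly the inputs on which A raises: a truthy entry whose length is not 2
-- (AssertionError), an ids sublist longer than its lengths sublist (IndexError reading entry[1][i]),
-- and a placement position idx + word_length - 1 outside [-len, len) (IndexError on backward_gaz).
def Pre_convert_forward_gaz_to_backward (forward_gaz : List (List (List Int))) : Prop :=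
  ∀ p ∈ PySem.List.enumerate forward_gaz 0, p.2 ≠ [] →
    p.2.length = 2 ∧
    (p.2.getD 0 []).length ≤ (p.2.getD 1 []).length ∧
    ∀ l ∈ (p.2.getD 1 []).take (p.2.getD 0 []).length,
      -(forward_gaz.length : Int) ≤ p.1 + l - 1 ∧ p.1 + l - 1 < (forward_gaz.length : Int)
instance (forward_gaz : List (List (List Int))) : Decidable (Pre_convert_forward_gaz_to_backward forward_gaz) := by
  unfold Pre_convert_forward_gaz_to_backward; infer_instance

def pvWitness_convert_forward_gaz_to_backward : List (List (List Int)) := [[[7], [1]], []]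

def Spec_convert_forward_gaz_to_backward (forward_gaz : List (List (List Int))) (out : List (List (List Int))) : Prop :=
  out = convert_forward_gaz_to_backward_alt forward_gaz
instance (forward_gaz : List (List (List Int))) (out : List (List (List Int))) : Decidable (Spec_convert_forward_gaz_to_backward forward_gaz out) := by
  unfold Spec_convert_forward_gaz_to_backward; infer_instance

-- ===== CLAIM (what is proved, stated in full; the proofs are below) =====
def Claim_equal_convert_forward_gaz_to_backward : Prop := ∀ (forward_gaz : List (List (List Int))), Dom_convert_forward_gaz_to_backward forward_gaz → Pre_convert_forward_gaz_to_backward forward_gaz → Spec_convert_forward_gaz_to_backward forward_gaz (convert_forward_gaz_to_backward forward_gaz)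

-- ===== LEMMAS AND PROOFS =====
-- proof-side helpers: the flattened placement list and the two single-write steps
def pvIds (entry : List (List Int)) : List Int := PySem.List.pyGetD entry 0 []
def pvLens (entry : List (List Int)) : List Int := PySem.List.pyGetD entry 1 []

def pvStep (bg : List (List (List Int))) (t : Int × Int × Int) : List (List (List Int)) :=
  let cur := PySem.List.pyGetD bg t.1 []
  if cur ≠ [] then
    PySem.List.pySetD bg t.1 [PySem.List.pyGetD cur 0 [] ++ [t.2.1], PySem.List.pyGetD cur 1 [] ++ [t.2.2]]
  else PySem.List.pySetD bg t.1 [[t.2.1], [t.2.2]]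

def pvStepB (bg : List (List (List Int))) (t : Int × Int × Int) : List (List (List Int)) :=
  let cell := PySem.List.pyGetD bg t.1 []
  let bg1 := if cell = [] then PySem.List.pySetD bg t.1 [[], []] else bg
  let cur := PySem.List.pyGetD bg1 t.1 []
  PySem.List.pySetD bg1 t.1
    [PySem.List.pyGetD cur 0 [] ++ [t.2.1], PySem.List.pyGetD cur 1 [] ++ [t.2.2]]

def pvTriples (idx : Int) (entry : List (List Int)) : List (Int × Int × Int) :=
  (List.range (pvIds entry).length).map (fun k =>
    (idx + (pvLens entry).getD k 0 - 1, (pvIds entry).getD k 0, (pvLens entry).getD k 0))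

def pvPlacements (fg : List (List (List Int))) : List (Int × Int × Int) :=
  (PySem.List.enumerate fg 0).flatMap (fun p => if p.2 ≠ [] then pvTriples p.1 p.2 else [])

theorem pv_foldl_flat {α β γ : Type} (g : β → List γ) (step : α → γ → α) (l : List β) (init : α) :
    l.foldl (fun acc x => (g x).foldl step acc) init = (l.flatMap g).foldl step init := by
  induction l generalizing init with
  | nil => rfl
  | cons x xs ih => simp [List.flatMap_cons, List.foldl_append, ih]

theorem pv_inner_eq (idx : Int) (entry : List (List Int)) (bg : List (List (List Int))) :
    (PySem.List.pyRange 0 ((PySem.List.pyGetD entry 0 []).length : Int) 1).foldl (fun backward_gaz i =>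
        let word_id := PySem.List.pyGetD (PySem.List.pyGetD entry 0 []) i 0
        let word_length := PySem.List.pyGetD (PySem.List.pyGetD entry 1 []) i 0
        let new_pos := idx + word_length - 1
        let cur := PySem.List.pyGetD backward_gaz new_pos []
        if cur ≠ [] then
          PySem.List.pySetD backward_gaz new_pos
            [PySem.List.pyGetD cur 0 [] ++ [word_id], PySem.List.pyGetD cur 1 [] ++ [word_length]]
        else
          PySem.List.pySetD backward_gaz new_pos [[word_id], [word_length]]) bg
      = (pvTriples idx entry).foldl pvStep bg := by
  rw [PySem.List.pyRange_zero_natCast, List.foldl_map]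
  unfold pvTriples pvIds pvLens
  rw [List.foldl_map]
  apply PySem.List.foldl_congr_mem
  intro acc k _
  simp [pvStep, PySem.List.pyGetD_natCast]

theorem pv_A_eq (fg : List (List (List Int))) :
    convert_forward_gaz_to_backward fg = (pvPlacements fg).foldl pvStep
      ((PySem.List.pyRange 0 (fg.length : Int) 1).foldl (fun acc _ => acc ++ [[]]) []) := by
  unfold convert_forward_gaz_to_backward pvPlacements init_list_of_objects
  dsimp only
  rw [← pv_foldl_flat (fun p : Int × List (List Int) => if p.2 ≠ [] then pvTriples p.1 p.2 else []) pvStep]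
  rw [PySem.List.enumerate_eq_map_pyRange (d := ([] : List (List Int))), List.foldl_map]
  apply PySem.List.foldl_congr_mem
  intro acc idx _
  by_cases h : PySem.List.pyGetD fg idx [] = []
  · simp [h]
  · simp only [h, ne_eq, not_false_eq_true, if_pos]
    exact pv_inner_eq idx _ acc

theorem pv_B_placements (fg : List (List (List Int))) :
    (PySem.List.enumerate fg 0).foldl (fun placements p =>
      if p.2 ≠ [] then
        (PySem.List.pyRange 0 ((PySem.List.pyGetD p.2 0 []).length : Int) 1).foldl (fun placements i =>
          placements ++ [(p.1 + PySem.List.pyGetD (PySem.List.pyGetD p.2 1 []) i 0 - 1,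
            PySem.List.pyGetD (PySem.List.pyGetD p.2 0 []) i 0,
            PySem.List.pyGetD (PySem.List.pyGetD p.2 1 []) i 0)]) placements
      else placements) [] = pvPlacements fg := by
  have h1 : (PySem.List.enumerate fg 0).foldl (fun placements p =>
      if p.2 ≠ [] then
        (PySem.List.pyRange 0 ((PySem.List.pyGetD p.2 0 []).length : Int) 1).foldl (fun placements i =>
          placements ++ [(p.1 + PySem.List.pyGetD (PySem.List.pyGetD p.2 1 []) i 0 - 1,
            PySem.List.pyGetD (PySem.List.pyGetD p.2 0 []) i 0,
            PySem.List.pyGetD (PySem.List.pyGetD p.2 1 []) i 0)]) placements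
      else placements) []
      = (PySem.List.enumerate fg 0).foldl (fun acc p =>
          acc ++ (if p.2 ≠ [] then pvTriples p.1 p.2 else [])) [] := by
    apply PySem.List.foldl_congr_mem
    intro acc p _
    by_cases h : p.2 = []
    · simp [h]
    · simp only [h, ne_eq, not_false_eq_true, if_pos]
      rw [PySem.List.foldl_append_singleton_eq_map, PySem.List.pyRange_zero_natCast, List.map_map]
      unfold pvTriples pvIds pvLens
      congr 1
      apply List.map_congr_left
      intro k _
      simp [PySem.List.pyGetD_natCast]
  rw [h1]
  rw [PySem.List.foldl_append_eq_flatMap]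
  rw [List.nil_append]
  rfl

theorem pv_B_eq (fg : List (List (List Int))) :
    convert_forward_gaz_to_backward_alt fg = (pvPlacements fg).foldl pvStepB
      ((PySem.List.pyRange 0 (fg.length : Int) 1).foldl (fun acc _ => acc ++ [[]]) []) := by
  unfold convert_forward_gaz_to_backward_alt
  dsimp only
  rw [pv_B_placements]
  rfl

theorem pv_pyIdx_lt {n : Nat} {i : Int} {j : Nat} (h : PySem.List.pyIdx? n i = some j) :
    j < n := by
  unfold PySem.List.pyIdx? at h
  split_ifs at h <;> simp_all <;> omega

theorem pv_step_eq (bg : List (List (List Int))) (t : Int × Int × Int) :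
    pvStepB bg t = pvStep bg t := by
  unfold pvStepB pvStep
  dsimp only
  rcases hj : PySem.List.pyIdx? bg.length t.1 with _ | j
  · -- index resolves to nothing: every read gives the default, every write is a no-op
    have hget : PySem.List.pyGetD bg t.1 ([] : List (List Int)) = [] := by
      simp [PySem.List.pyGetD, PySem.List.pyGet?, hj]
    have hset : ∀ v, PySem.List.pySetD bg t.1 v = bg := by
      intro v
      simp [PySem.List.pySetD, PySem.List.pySet?, hj]
    simp [hget, hset]
  · have hjlt : j < bg.length := pv_pyIdx_lt hj
    have hget : PySem.List.pyGetD bg t.1 ([] : List (List Int)) = bg[j] := by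
      simp [PySem.List.pyGetD, PySem.List.pyGet?, hj, List.getElem?_eq_getElem hjlt]
    have hset : ∀ v, PySem.List.pySetD bg t.1 v = bg.set j v := by
      intro v
      simp [PySem.List.pySetD, PySem.List.pySet?, hj]
    by_cases hc : bg[j] = ([] : List (List Int))
    · -- empty cell: B first installs [[], []], then appends into it; A writes [[id],[len]] at once
      have hget2 : PySem.List.pyGetD (bg.set j ([[], []] : List (List Int))) t.1 [] = [[], []] := by
        simp [PySem.List.pyGetD, PySem.List.pyGet?, hj, hjlt, List.getElem?_set]
      have hset2 : ∀ v, PySem.List.pySetD (bg.set j ([[], []] : List (List Int))) t.1 v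
          = bg.set j v := by
        intro v
        simp [PySem.List.pySetD, PySem.List.pySet?, hj, List.set_set]
      have h0 : PySem.List.pyGetD ([[], []] : List (List Int)) 0 [] = [] := by decide
      have h1 : PySem.List.pyGetD ([[], []] : List (List Int)) 1 [] = [] := by decide
      simp [hget, hc, hset, hset2, hget2, h0, h1]
    · simp [hget, hc, hset]

theorem pv_fold_step_eq (P : List (Int × Int × Int)) (bg : List (List (List Int))) :
    P.foldl pvStepB bg = P.foldl pvStep bg := by
  have : pvStepB = pvStep := funext fun bg => funext fun t => pv_step_eq bg t
  rw [this]

-- ===== VERDICT (by name: the statement is the Claim_ definition above) =====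
theorem convert_forward_gaz_to_backward_spec : Claim_equal_convert_forward_gaz_to_backward := by
  intro fg _ _
  unfold Spec_convert_forward_gaz_to_backward
  rw [pv_A_eq, pv_B_eq, pv_fold_step_eq]
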